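-- pv_equiv track=rewrite | github.com/lambrospetrou/problem-solving | elements-of-programming-interviews/book-exercises/python_solutions/ch5_arrays.py | delete_if_morethan_m
-- ===== SOURCE A (Python) =====
-- def delete_if_morethan_m(A, m):
--     if not A:
--         return A
--
--     writeIdx = 1
--     instances = 1
--     for i in range(1, len(A)):
--         if A[writeIdx-1] != A[i]:
--             A[writeIdx] = A[i]
--             writeIdx += 1
--             instances = 1
--         elif instances < min(2, m):
--             A[writeIdx] = A[i]
--             writeIdx += 1
--             instances += 1
--
--     return A[:writeIdx]
-- ===== SOURCE B (Python) =====
-- def delete_if_morethan_m(A, m):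
--     if not A:
--         return A
--     cap = min(2, m)
--     if cap < 1:
--         cap = 1
--     kept = []
--     i = 0
--     n = len(A)
--     while i < n:
--         j = i
--         while j < n and A[j] == A[i]:
--             j += 1
--         kept.extend(A[i:i + min(j - i, cap)])
--         i = j
--     A[:len(kept)] = kept
--     return A[:len(kept)]
-- ===== Notes on version B (the rewrite author's own statement) =====
-- stated objective: alternative
-- what changed: A compacts the list in one pass with a writeIdx/instances state machine; B splits the list into maximal runs of equal elements (inner run-scanning loop) and keeps the first min(run length, max(1, min(2, m))) elements of each run.
import Mathlib
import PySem

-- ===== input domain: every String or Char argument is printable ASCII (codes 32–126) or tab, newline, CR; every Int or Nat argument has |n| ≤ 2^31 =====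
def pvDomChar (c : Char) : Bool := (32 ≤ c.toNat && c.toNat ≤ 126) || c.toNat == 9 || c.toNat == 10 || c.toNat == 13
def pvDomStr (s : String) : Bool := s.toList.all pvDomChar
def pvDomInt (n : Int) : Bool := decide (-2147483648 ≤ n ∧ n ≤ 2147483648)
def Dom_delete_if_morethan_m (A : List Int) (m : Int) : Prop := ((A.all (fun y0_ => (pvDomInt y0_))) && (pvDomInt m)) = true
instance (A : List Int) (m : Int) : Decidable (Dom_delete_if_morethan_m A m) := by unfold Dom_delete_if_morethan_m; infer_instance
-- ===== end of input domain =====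

-- B replaces A's writeIdx/instances state-machine loop with a run-splitting traversal
-- (find each maximal run of equal elements, keep its first min(len, cap) elements);
-- equivalence is about the RETURN value (both Pythons also mutate A's prefix identically).

-- ===== PORT A =====
-- the body of A's for-loop; state = (A, writeIdx, instances)
def aBody (m : Int) (s : List Int × Int × Int) (i : Int) : List Int × Int × Int :=
  if PySem.List.pyGetD s.1 (s.2.1 - 1) 0 ≠ PySem.List.pyGetD s.1 i 0 then
    (PySem.List.pySetD s.1 s.2.1 (PySem.List.pyGetD s.1 i 0), s.2.1 + 1, 1)
  else if s.2.2 < min 2 m then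
    (PySem.List.pySetD s.1 s.2.1 (PySem.List.pyGetD s.1 i 0), s.2.1 + 1, s.2.2 + 1)
  else s

def delete_if_morethan_m (A : List Int) (m : Int) : List Int :=
  if A = [] then A
  else
    let st := (PySem.List.pyRange 1 ((A.length : Int)) 1).foldl (aBody m) (A, (1 : Int), (1 : Int))
    PySem.List.slice st.1 none (some st.2.1)

-- ===== PORT B =====
-- B's inner while loop: length of the leading run of elements equal to v
def countRun (v : Int) : List Int → Nat
  | [] => 0
  | x :: xs => if x = v then 1 + countRun v xs else 0

-- B's outer while loop over runs
def keepRuns (cap : Nat) : List Int → List Int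
  | [] => []
  | x :: xs =>
      let k := 1 + countRun x xs
      (x :: xs).take (min k cap) ++ keepRuns cap ((x :: xs).drop k)
  termination_by l => l.length
  decreasing_by simp

def delete_if_morethan_m_alt (A : List Int) (m : Int) : List Int :=
  if A = [] then A
  else
    let cap : Int := min 2 m
    let cap2 : Int := if cap < 1 then 1 else cap
    keepRuns cap2.toNat A

-- ===== PRECONDITION & SPEC =====
def Spec_delete_if_morethan_m (A : List Int) (m : Int) (out : List Int) : Prop := out = delete_if_morethan_m_alt A m
instance (A : List Int) (m : Int) (out : List Int) : Decidable (Spec_delete_if_morethan_m A m out) := by unfold Spec_delete_if_morethan_m; infer_instance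

-- ===== CLAIM (what is proved, stated in full; the proofs are below) =====
def Claim_equal_delete_if_morethan_m : Prop := ∀ (A : List Int) (m : Int), Dom_delete_if_morethan_m A m → Spec_delete_if_morethan_m A m (delete_if_morethan_m A m)

-- ===== LEMMAS AND PROOFS =====

-- functional model of A's loop body: state = (kept, reversed; instances)
def stepM (m : Int) (s : List Int × Int) (x : Int) : List Int × Int :=
  if s.1.headD 0 ≠ x then (x :: s.1, 1)
  else if s.2 < min 2 m then (x :: s.1, s.2 + 1)
  else s

-- A's kept output, as a direct recursion (v = last kept value, inst = instances)
def keepCont (m : Int) : Int → Int → List Int → List Int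
  | _, _, [] => []
  | v, inst, x :: xs =>
    if v ≠ x then x :: keepCont m x 1 xs
    else if inst < min 2 m then x :: keepCont m v (inst + 1) xs
    else keepCont m v inst xs

def capI (m : Int) : Int := if min 2 m < 1 then 1 else min 2 m

lemma capI_pos (m : Int) : 1 ≤ capI m := by
  unfold capI; split <;> omega

-- A's array loop realises the functional model: positions < writeIdx hold the kept
-- elements (r, reversed), positions in [writeIdx, i) hold junk, positions >= i untouched.
lemma getD_at_len (l1 l2 : List Int) (x d : Int) : (l1 ++ x :: l2).getD l1.length d = x := by
  simp [List.getD]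

lemma set_at_len (K L : List Int) (x t : Int) : (K ++ x :: L).set K.length t = K ++ t :: L := by
  rw [List.set_append_right _ _ (le_refl _)]; simp

lemma loopA (m : Int) : ∀ (tail junk r : List Int) (inst a b : Int), r ≠ [] →
    a = (r.length : Int) + (junk.length : Int) →
    b = a + (tail.length : Int) →
    ∃ junk2 : List Int,
      (PySem.List.pyRange a b 1).foldl (aBody m) (r.reverse ++ junk ++ tail, (r.length : Int), inst)
      = ((tail.foldl (stepM m) (r, inst)).1.reverse ++ junk2,
         ((tail.foldl (stepM m) (r, inst)).1.length : Int),
         (tail.foldl (stepM m) (r, inst)).2) := by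
  intro tail
  induction tail with
  | nil =>
    intro junk r inst a b hr ha hb
    refine ⟨junk, ?_⟩
    have hnil : PySem.List.pyRange a b 1 = [] := PySem.List.pyRange_one_eq_nil
      (by simp only [List.length_nil, Nat.cast_zero] at hb; omega)
    rw [hnil]
    simp
  | cons t ts ih =>
    intro junk r inst a b hr ha hb
    cases r with
    | nil => exact absurd rfl hr
    | cons v r0 =>
      have hab : a < b := by simp only [List.length_cons, List.length_append, List.length_reverse, List.length_nil, Nat.cast_add, Nat.cast_one, Nat.cast_zero] at hb; omega
      rw [PySem.List.pyRange_one_cons hab, List.foldl_cons]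
      have hidx1 : ((v :: r0).length : Int) - 1 = ((r0.length : Nat) : Int) := by
        simp only [List.length_cons, List.length_append, List.length_reverse, List.length_nil, Nat.cast_add, Nat.cast_one, Nat.cast_zero]; omega
      have hread1 : PySem.List.pyGetD ((v :: r0).reverse ++ junk ++ t :: ts)
          (((v :: r0).length : Int) - 1) 0 = v := by
        rw [hidx1, PySem.List.pyGetD_natCast]
        have hsplit : (v :: r0).reverse ++ junk ++ t :: ts
            = r0.reverse ++ v :: (junk ++ t :: ts) := by simp
        rw [hsplit]
        simpa using getD_at_len r0.reverse (junk ++ t :: ts) v 0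
      have ha2 : a = ((((v :: r0).reverse ++ junk).length : Nat) : Int) := by
        simp only [List.length_cons, List.length_append, List.length_reverse, List.length_nil, Nat.cast_add, Nat.cast_one, Nat.cast_zero] at ha ⊢; omega
      have hread2 : PySem.List.pyGetD ((v :: r0).reverse ++ junk ++ t :: ts) a 0 = t := by
        rw [ha2, PySem.List.pyGetD_natCast]
        simpa [List.append_assoc] using getD_at_len ((v :: r0).reverse ++ junk) ts t 0
      simp only [aBody, hread1, hread2, List.foldl_cons, stepM, List.headD_cons]
      by_cases hvt : v = t
      · subst hvt
        simp only [ne_eq, not_true_eq_false, if_false]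
        by_cases hlt : inst < min 2 m
        · simp only [if_pos hlt]
          rw [PySem.List.pySetD_natCast]
          -- the write: two cases on junk
          cases junk with
          | nil =>
            have hset : ((v :: r0).reverse ++ [] ++ v :: ts).set (v :: r0).length v
                = (v :: v :: r0).reverse ++ [] ++ ts := by
              have := set_at_len (v :: r0).reverse ts v v
              simpa using this
            rw [hset]
            have hw : ((v :: r0).length : Int) + 1 = ((v :: v :: r0).length : Int) := by
              simp
            rw [hw]
            exact ih [] (v :: v :: r0) (inst + 1) (a + 1) b (by simp)
              (by simp only [List.length_cons, List.length_append, List.length_reverse, List.length_nil, Nat.cast_add, Nat.cast_one, Nat.cast_zero] at ha ⊢; omega) (by simp only [List.length_cons, List.length_append, List.length_reverse, List.length_nil, Nat.cast_add, Nat.cast_one, Nat.cast_zero] at hb ⊢; omega)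
          | cons j jr =>
            have hset : ((v :: r0).reverse ++ j :: jr ++ v :: ts).set (v :: r0).length v
                = (v :: v :: r0).reverse ++ (jr ++ [v]) ++ ts := by
              have := set_at_len (v :: r0).reverse (jr ++ v :: ts) j v
              simp only [List.length_reverse] at this ⊢
              rw [show (v :: r0).reverse ++ j :: jr ++ v :: ts
                  = (v :: r0).reverse ++ j :: (jr ++ v :: ts) by simp] at *
              rw [this]; simp
            rw [hset]
            have hw : ((v :: r0).length : Int) + 1 = ((v :: v :: r0).length : Int) := by
              simp
            rw [hw]
            exact ih (jr ++ [v]) (v :: v :: r0) (inst + 1) (a + 1) b (by simp)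
              (by simp only [List.length_cons, List.length_append, List.length_reverse, List.length_nil, Nat.cast_add, Nat.cast_one, Nat.cast_zero] at ha ⊢; omega) (by simp only [List.length_cons, List.length_append, List.length_reverse, List.length_nil, Nat.cast_add, Nat.cast_one, Nat.cast_zero] at hb ⊢; omega)
        · simp only [if_neg hlt]
          have hre : (v :: r0).reverse ++ junk ++ v :: ts
              = (v :: r0).reverse ++ (junk ++ [v]) ++ ts := by simp
          rw [hre]
          exact ih (junk ++ [v]) (v :: r0) inst (a + 1) b (by simp)
            (by simp only [List.length_cons, List.length_append, List.length_reverse, List.length_nil, Nat.cast_add, Nat.cast_one, Nat.cast_zero] at ha ⊢; omega) (by simp only [List.length_cons, List.length_append, List.length_reverse, List.length_nil, Nat.cast_add, Nat.cast_one, Nat.cast_zero] at hb ⊢; omega)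
      · simp only [ne_eq, hvt, not_false_eq_true, if_true]
        rw [PySem.List.pySetD_natCast]
        cases junk with
        | nil =>
          have hset : ((v :: r0).reverse ++ [] ++ t :: ts).set (v :: r0).length t
              = (t :: v :: r0).reverse ++ [] ++ ts := by
            have := set_at_len (v :: r0).reverse ts t t
            simpa using this
          rw [hset]
          have hw : ((v :: r0).length : Int) + 1 = ((t :: v :: r0).length : Int) := by
            simp
          rw [hw]
          exact ih [] (t :: v :: r0) 1 (a + 1) b (by simp)
            (by simp only [List.length_cons, List.length_append, List.length_reverse, List.length_nil, Nat.cast_add, Nat.cast_one, Nat.cast_zero] at ha ⊢; omega) (by simp only [List.length_cons, List.length_append, List.length_reverse, List.length_nil, Nat.cast_add, Nat.cast_one, Nat.cast_zero] at hb ⊢; omega)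
        | cons j jr =>
          have hset : ((v :: r0).reverse ++ j :: jr ++ t :: ts).set (v :: r0).length t
              = (t :: v :: r0).reverse ++ (jr ++ [t]) ++ ts := by
            have := set_at_len (v :: r0).reverse (jr ++ t :: ts) j t
            simp only [List.length_reverse] at this ⊢
            rw [show (v :: r0).reverse ++ j :: jr ++ t :: ts
                = (v :: r0).reverse ++ j :: (jr ++ t :: ts) by simp] at *
            rw [this]; simp
          rw [hset]
          have hw : ((v :: r0).length : Int) + 1 = ((t :: v :: r0).length : Int) := by
            simp
          rw [hw]
          exact ih (jr ++ [t]) (t :: v :: r0) 1 (a + 1) b (by simp)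
            (by simp only [List.length_cons, List.length_append, List.length_reverse, List.length_nil, Nat.cast_add, Nat.cast_one, Nat.cast_zero] at ha ⊢; omega) (by simp only [List.length_cons, List.length_append, List.length_reverse, List.length_nil, Nat.cast_add, Nat.cast_one, Nat.cast_zero] at hb ⊢; omega)

-- the functional model, as the direct recursion keepCont
lemma model_eq_keepCont (m : Int) : ∀ (tail r0 : List Int) (v inst : Int),
    (tail.foldl (stepM m) (v :: r0, inst)).1.reverse
      = r0.reverse ++ [v] ++ keepCont m v inst tail := by
  intro tail
  induction tail with
  | nil => intro r0 v inst; simp [keepCont]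
  | cons t ts ih =>
    intro r0 v inst
    simp only [List.foldl_cons, stepM, keepCont, List.headD_cons]
    by_cases hvt : v = t
    · subst hvt
      simp only [ne_eq, not_true_eq_false, if_false]
      by_cases hlt : inst < min 2 m
      · simp only [if_pos hlt, ih (v :: r0) v (inst + 1)]
        simp
      · simp only [if_neg hlt, ih r0 v inst]
    · simp only [ne_eq, hvt, not_false_eq_true, if_true]
      rw [ih (v :: r0) t 1]
      simp

lemma take_run : ∀ (xs : List Int) (v : Int) (k : Nat), k ≤ countRun v xs →
    xs.take k = List.replicate k v := by
  intro xs
  induction xs with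
  | nil => intro v k h; simp [countRun] at h; simp [h]
  | cons x xs ih =>
    intro v k h
    simp only [countRun] at h
    by_cases hx : x = v
    · subst hx
      simp at h
      cases k with
      | zero => simp
      | succ k => simpa [List.replicate_succ] using ih x k (by omega)
    · simp [hx] at h
      simp [h]

lemma keepCont_eq_keepRuns (m : Int) : ∀ (xs : List Int) (v inst : Int),
    1 ≤ inst → inst ≤ capI m →
    keepCont m v inst xs
      = List.replicate (min (countRun v xs) ((capI m - inst).toNat)) v
          ++ keepRuns (capI m).toNat (xs.drop (countRun v xs)) := by
  intro xs
  induction xs with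
  | nil => intro v inst h1 h2; simp [keepCont, countRun, keepRuns]
  | cons x xs ih =>
    intro v inst h1 h2
    have hc := capI_pos m
    by_cases hvx : v = x
    · subst hvx
      have hcnt : countRun v (v :: xs) = 1 + countRun v xs := by simp [countRun]
      rw [hcnt]
      have hdrop : (v :: xs).drop (1 + countRun v xs) = xs.drop (countRun v xs) := by
        rw [Nat.add_comm, List.drop_succ_cons]
      rw [hdrop]
      by_cases hlt : inst < min 2 m
      · have hlt' : inst < capI m := by unfold capI; split <;> omega
        have hL : keepCont m v inst (v :: xs) = v :: keepCont m v (inst + 1) xs := by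
          simp [keepCont, hlt]
        rw [hL, ih v (inst + 1) (by omega) (by omega)]
        have hmin : min (1 + countRun v xs) ((capI m - inst).toNat)
            = min (countRun v xs) ((capI m - (inst + 1)).toNat) + 1 := by omega
        rw [hmin, List.replicate_succ']
        have hmin2 : (capI m - (inst + 1)).toNat = (capI m - inst - 1).toNat := by omega
        rw [hmin2]
        have hrep : v :: List.replicate (min (countRun v xs) ((capI m - inst - 1).toNat)) v
            = List.replicate (min (countRun v xs) ((capI m - inst - 1).toNat)) v ++ [v] := by
          rw [← List.replicate_succ, List.replicate_succ']
        rw [← List.cons_append, hrep, List.append_assoc, List.singleton_append]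
      · have hge : capI m ≤ inst := by unfold capI; split <;> omega
        have hz : (capI m - inst).toNat = 0 := by omega
        have hL : keepCont m v inst (v :: xs) = keepCont m v inst xs := by
          simp [keepCont, hlt]
        rw [hL, ih v inst h1 h2, hz]
        simp
    · have hxv : ¬ x = v := fun h => hvx h.symm
      have hcnt : countRun v (x :: xs) = 0 := by simp [countRun, hxv]
      rw [hcnt]
      simp only [Nat.min_zero, List.replicate_zero, List.nil_append, List.drop_zero]
      have hL : keepCont m v inst (x :: xs) = x :: keepCont m x 1 xs := by
        simp [keepCont, hvx]
      rw [hL, ih x 1 (by omega) hc]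
      rw [keepRuns]
      have hmin : min (1 + countRun x xs) (capI m).toNat
          = min (countRun x xs) ((capI m).toNat - 1) + 1 := by omega
      rw [hmin, List.take_succ_cons]
      rw [take_run xs x _ (Nat.min_le_left _ _)]
      have hdrop : (x :: xs).drop (1 + countRun x xs) = xs.drop (countRun x xs) := by
        rw [Nat.add_comm, List.drop_succ_cons]
      rw [hdrop]
      have h1' : (capI m - 1).toNat = (capI m).toNat - 1 := by omega
      simp [h1']

-- the two together: A's kept prefix for a nonempty list is B's run-keeping
lemma cons_keep (m v : Int) (as : List Int) :
    v :: keepCont m v 1 as = keepRuns (capI m).toNat (v :: as) := by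
  have hc := capI_pos m
  rw [keepCont_eq_keepRuns m as v 1 (le_refl 1) hc]
  rw [keepRuns]
  have hmin : min (1 + countRun v as) (capI m).toNat
      = min (countRun v as) ((capI m).toNat - 1) + 1 := by omega
  rw [hmin, List.take_succ_cons, take_run as v _ (Nat.min_le_left _ _)]
  have hdrop : (v :: as).drop (1 + countRun v as) = as.drop (countRun v as) := by
    rw [Nat.add_comm, List.drop_succ_cons]
  rw [hdrop]
  have h1' : (capI m - 1).toNat = (capI m).toNat - 1 := by omega
  simp [h1']

-- ===== VERDICT (by name: the statement is the Claim_ definition above) =====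
theorem delete_if_morethan_m_spec : Claim_equal_delete_if_morethan_m := by
  intro A m _
  unfold Spec_delete_if_morethan_m
  cases A with
  | nil => rfl
  | cons v as =>
    have halt : delete_if_morethan_m_alt (v :: as) m = keepRuns (capI m).toNat (v :: as) := by
      simp [delete_if_morethan_m_alt, capI]
    rw [halt]
    unfold delete_if_morethan_m
    rw [if_neg (List.cons_ne_nil v as)]
    obtain ⟨junk2, hL⟩ := loopA m as [] [v] 1 1 ((v :: as).length : Int)
      (by simp) (by simp)
      (by simp only [List.length_cons, List.length_nil, Nat.cast_add, Nat.cast_one,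
            Nat.cast_zero]; omega)
    simp only [List.reverse_cons, List.reverse_nil, List.nil_append, List.append_nil,
      List.singleton_append, List.length_cons, List.length_nil, Nat.cast_add, Nat.cast_one,
      Nat.cast_zero, zero_add] at hL
    simp only [List.length_cons, Nat.cast_add, Nat.cast_one]
    rw [hL, PySem.List.slice_to_natCast]
    rw [List.take_left' (by simp)]
    rw [model_eq_keepCont m as [] v 1]
    simpa using cons_keep m v as
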